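-- pv_equiv track=rewrite | github.com/tklab-group/md_embedding_ye | common/util.py | to_n_gram_list
-- ===== SOURCE A (Python) =====
-- def to_n_gram_list(word, n=3, is_container_self=False):
--     result = list()
--     word_len = len(word)
--     if word_len <= n:
--         result.append('<' + word + '>')
--         return result
--     if is_container_self:
--         result.append('<' + word + '>')
--     result.append('<' + word[0: n - 1])
--     for i in range(word_len):
--         cur_word = word[i: i + n]
--         if len(cur_word) == n:
--             result.append(word[i: i + n])
--     result.append(word[word_len - n + 1: word_len] + '>')
--     return result
-- ===== SOURCE B (Python) =====
-- def to_n_gram_list(word, n=3, is_container_self=False):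
--     if len(word) <= n:
--         return ['<' + word + '>']
--     padded = '<' + word + '>'
--     result = ['<' + word + '>'] if is_container_self else []
--     result.extend(padded[i:i + n] for i in range(len(padded) - n + 1))
--     return result
-- ===== Notes on version B (the rewrite author's own statement) =====
-- stated objective: idiomatic
-- what changed: B pads the word with the boundary markers once and emits every n-gram with one uniform sliding window over the padded string, replacing A's special-cased first gram, length-guarded inner loop over the raw word, and special-cased last gram.
-- outside the precondition, e.g. on to_n_gram_list('ab', 0, False): A returns ['<a', '', '', '>'], B returns ['', '', '', '', '']
import Mathlib
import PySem

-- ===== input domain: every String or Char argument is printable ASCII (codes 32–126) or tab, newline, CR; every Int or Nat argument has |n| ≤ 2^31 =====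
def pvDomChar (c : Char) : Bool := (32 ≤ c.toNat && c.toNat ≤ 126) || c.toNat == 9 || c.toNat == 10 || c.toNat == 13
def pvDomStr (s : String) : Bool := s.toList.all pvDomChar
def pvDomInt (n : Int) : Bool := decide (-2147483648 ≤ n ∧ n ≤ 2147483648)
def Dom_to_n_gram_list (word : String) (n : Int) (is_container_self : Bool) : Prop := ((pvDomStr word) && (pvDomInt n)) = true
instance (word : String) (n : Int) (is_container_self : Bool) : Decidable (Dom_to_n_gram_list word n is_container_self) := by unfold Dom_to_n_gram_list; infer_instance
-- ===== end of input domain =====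

-- B builds the padded word once and emits every n-gram with one uniform sliding window
-- (idiomatic re-decomposition); A = B is proved for the natural gram sizes n ≥ 1.


-- ===== PORT A =====
def to_n_gram_list (word : String) (n : Int) (is_container_self : Bool) : List String :=
  let w := word.toList
  let word_len : Int := w.length
  if word_len ≤ n then
    [String.ofList ('<' :: w ++ ['>'])]
  else
    let result : List String :=
      if is_container_self then [String.ofList ('<' :: w ++ ['>'])] else []
    let result := result ++ [String.ofList ('<' :: PySem.List.slice w (some 0) (some (n - 1)))]
    let result := (PySem.List.pyRange 0 word_len 1).foldl (fun acc i =>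
        let cur := PySem.List.slice w (some i) (some (i + n))
        if (cur.length : Int) = n then
          acc ++ [String.ofList (PySem.List.slice w (some i) (some (i + n)))]
        else acc) result
    result ++ [String.ofList (PySem.List.slice w (some (word_len - n + 1)) (some word_len) ++ ['>'])]

-- ===== PORT B =====
def to_n_gram_list_alt (word : String) (n : Int) (is_container_self : Bool) : List String :=
  let w := word.toList
  if (w.length : Int) ≤ n then
    [String.ofList ('<' :: w ++ ['>'])]
  else
    let padded := '<' :: w ++ ['>']
    let result : List String :=
      if is_container_self then [String.ofList padded] else []
    result ++ (PySem.List.pyRange 0 ((padded.length : Int) - n + 1) 1).map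
        (fun i => String.ofList (PySem.List.slice padded (some i) (some (i + n))))

-- ===== PRECONDITION & SPEC =====
-- Pre_ excludes n ≤ 0, outside the natural n-gram domain, where A's mix of raw-word
-- windows and boundary slices yields degenerate empty-gram lists.
def Pre_to_n_gram_list (word : String) (n : Int) (is_container_self : Bool) : Prop := 1 ≤ n
instance (word : String) (n : Int) (is_container_self : Bool) : Decidable (Pre_to_n_gram_list word n is_container_self) := by unfold Pre_to_n_gram_list; infer_instance
def pvWitness_to_n_gram_list : String × Int × Bool := ("abcd", 2, false)

def Spec_to_n_gram_list (word : String) (n : Int) (is_container_self : Bool) (out : List String) : Prop := out = to_n_gram_list_alt word n is_container_self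
instance (word : String) (n : Int) (is_container_self : Bool) (out : List String) : Decidable (Spec_to_n_gram_list word n is_container_self out) := by unfold Spec_to_n_gram_list; infer_instance

-- ===== CLAIM (what is proved, stated in full; the proofs are below) =====
def Claim_equal_to_n_gram_list : Prop := ∀ (word : String) (n : Int) (is_container_self : Bool), Dom_to_n_gram_list word n is_container_self → Pre_to_n_gram_list word n is_container_self → Spec_to_n_gram_list word n is_container_self (to_n_gram_list word n is_container_self)

-- ===== LEMMAS AND PROOFS =====

-- The core list-level fact: for 1 ≤ m < L = w.length, A's grams (boundary gram, full
-- raw-word windows, boundary gram) are exactly the sliding windows of '<' :: w ++ ['>'].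
lemma windows_eq (w : List Char) (m : Nat) (hm : 1 ≤ m) (hmL : m < w.length) :
    ('<' :: w.take (m - 1)) ::
      ((List.range (w.length - m + 1)).map (fun i => (w.drop i).take m)
        ++ [w.drop (w.length - m + 1) ++ ['>']])
    = (List.range (w.length - m + 3)).map
        (fun k => ((('<' :: w ++ ['>']).drop k).take m)) := by
  obtain ⟨m', rfl⟩ : ∃ m', m = m' + 1 := ⟨m - 1, by omega⟩
  conv_rhs => rw [show w.length - (m' + 1) + 3 = (w.length - (m' + 1) + 1) + 1 + 1 from by omega,
    List.range_succ_eq_map, List.map_cons, List.range_succ, List.map_append, List.map_append,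
    List.map_map]
  congr 1
  · simp only [List.drop_zero, List.cons_append, List.take_succ_cons, Nat.add_sub_cancel]
    rw [List.take_append_of_le_length (by omega)]
  congr 1
  · apply List.map_congr_left
    intro i hi
    simp only [List.mem_range] at hi
    simp only [Function.comp_apply, List.cons_append, List.drop_succ_cons]
    rw [List.drop_append_of_le_length (by omega), List.take_append_of_le_length (by simp; omega)]
  · simp only [List.cons_append, List.drop_succ_cons, List.map_cons, List.map_nil]
    rw [List.drop_append_of_le_length (by omega),
        List.take_of_length_le (by simp; omega)]

-- 'if cond: out.append(g(i))' over a list, as init ++ filtered grams.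
lemma foldl_ite_append (l : List Nat) (N : Nat) (g : Nat → String) (init : List String) :
    l.foldl (fun acc i => if i < N then acc ++ [g i] else acc) init
    = init ++ (l.filter (fun i => decide (i < N))).map g := by
  induction l generalizing init with
  | nil => simp
  | cons a t ih =>
    simp only [List.foldl_cons, List.filter_cons]
    by_cases h : a < N <;> simp [h, ih]

lemma filter_range_lt (N L : Nat) (h : N ≤ L) :
    (List.range L).filter (fun i => decide (i < N)) = List.range N := by
  rw [show L = N + (L - N) from by omega, List.range_add, List.filter_append]
  have h1 : (List.range N).filter (fun i => decide (i < N)) = List.range N :=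
    List.filter_eq_self.mpr (by intro a ha; simp only [List.mem_range] at ha; simpa using ha)
  have h2 : ((List.range (L - N)).map (fun i => N + i)).filter (fun i => decide (i < N)) = [] :=
    List.filter_eq_nil_iff.mpr (by intro a ha; simp only [List.mem_map] at ha; obtain ⟨x, _, rfl⟩ := ha; simp)
  rw [h1, h2, List.append_nil]

-- ===== VERDICT (by name: the statement is the Claim_ definition above) =====
theorem to_n_gram_list_spec : Claim_equal_to_n_gram_list := by
  intro word n ics hdom hpre
  unfold Pre_to_n_gram_list at hpre
  have hn0 : 0 ≤ n := le_trans (by norm_num) hpre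
  unfold Spec_to_n_gram_list to_n_gram_list to_n_gram_list_alt
  lift n to Nat using hn0 with m
  have hm1 : 1 ≤ m := by exact_mod_cast hpre
  by_cases hle : ((word.toList.length : Int) ≤ (m : Int))
  · simp only [hle, if_pos]
  · rw [if_neg hle, if_neg hle]
    have hmL : m < word.toList.length := by exact_mod_cast not_le.mp hle
    set w := word.toList with hw
    clear_value w
    -- A's first boundary gram is take (m-1)
    have hfirst : PySem.List.slice w (some 0) (some ((m : Int) - 1)) = w.take (m - 1) := by
      rw [show ((m : Int) - 1) = ((m - 1 : Nat) : Int) from by omega]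
      simp [PySem.List.slice_to_natCast]
    -- A's loop: exactly the full windows over the raw word
    have hloop : ∀ init : List String,
        (PySem.List.pyRange 0 (w.length : Int) 1).foldl (fun acc i =>
          let cur := PySem.List.slice w (some i) (some (i + (m : Int)))
          if (cur.length : Int) = (m : Int) then
            acc ++ [String.ofList (PySem.List.slice w (some i) (some (i + (m : Int))))]
          else acc) init
        = init ++ (List.range (w.length - m + 1)).map (fun i => String.ofList ((w.drop i).take m)) := by
      intro init
      rw [PySem.List.pyRange_zero_natCast, List.foldl_map]
      refine (PySem.List.foldl_congr_mem _ _
          (fun acc i => if i < w.length - m + 1 then acc ++ [String.ofList ((w.drop i).take m)] else acc)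
          init ?_).trans ?_
      case _ =>
        intro acc i hi
        simp only [List.mem_range] at hi
        simp only [PySem.List.slice_natCast_add]
        have hcond : (((((w.drop i).take m).length : Nat) : Int) = (m : Int)) ↔ (i < w.length - m + 1) := by
          simp only [List.length_take, List.length_drop]
          omega
        by_cases hc : i < w.length - m + 1
        · rw [if_pos (hcond.mpr hc), if_pos hc]
        · rw [if_neg (fun h => hc (hcond.mp h)), if_neg hc]
      case _ =>
        rw [foldl_ite_append, filter_range_lt _ _ (by omega)]
    -- A's last boundary gram
    have hlast : PySem.List.slice w (some ((w.length : Int) - (m : Int) + 1)) (some (w.length : Int))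
        = w.drop (w.length - m + 1) := by
      rw [show ((w.length : Int) - (m : Int) + 1) = ((w.length - m + 1 : Nat) : Int) from by omega,
          PySem.List.slice_natCast]
      exact List.take_of_length_le (by simp only [List.length_drop]; omega)
    -- B's window list
    have hBlen : ((('<' :: w ++ ['>']).length : Int) - (m : Int) + 1) = ((w.length - m + 3 : Nat) : Int) := by
      simp only [List.cons_append, List.length_cons, List.length_append, List.length_nil]
      omega
    have hB : (PySem.List.pyRange 0 ((('<' :: w ++ ['>']).length : Int) - (m : Int) + 1) 1).map
          (fun i => String.ofList (PySem.List.slice ('<' :: w ++ ['>']) (some i) (some (i + (m : Int)))))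
        = (List.range (w.length - m + 3)).map
          (fun k => String.ofList ((('<' :: w ++ ['>']).drop k).take m)) := by
      rw [hBlen, PySem.List.pyRange_zero_natCast, List.map_map]
      apply List.map_congr_left
      intro k _
      simp [PySem.List.slice_natCast_add]
    have hkey := congrArg (List.map String.ofList) (windows_eq w m hm1 hmL)
    simp only [List.map_cons, List.map_append, List.map_map, List.map_nil,
      Function.comp_def] at hkey
    rw [hfirst, hloop, hlast, hB, ← hkey]
    simp [List.append_assoc]
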